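-- pv_equiv track=rewrite | github.com/MrBrantCode/unitest_baseline | mut_generate/mist_train_cf/cf_73053/solution.py | compute_C_value
-- ===== SOURCE A (Python) =====
-- def compute_C_value(n):
--     """
--     This function calculates the sum of the least intricacy of an n x n binary matrix
--     for all possible numbers of ones (from 0 to n^2).
--
--     Args:
--     n (int): The size of the binary matrix.
--
--     Returns:
--     int: The sum of the least intricacy of the matrix.
--     """
--     C = 0
--     for ones in range(n**2 + 1):
--         matrix = [[0 for _ in range(n)] for _ in range(n)]
--         for i in range(ones):
--             matrix[i%n][i//n] = 1
--         rows = [''.join(map(str, row)) for row in matrix]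
--         columns = [''.join(map(str, column)) for column in zip(*matrix)]
--         C += len(set(rows + columns))
--     return C
-- ===== SOURCE B (Python) =====
-- def compute_C_value(n):
--     if n == 0:
--         return 0
--     total = 0
--     for k in range(n * n + 1):
--         q, r = divmod(k, n)
--         vals = {q}
--         if r:
--             vals.add(q + 1)
--         if q >= 1:
--             vals.add(n)
--         if r:
--             vals.add(r)
--         if q + (1 if r else 0) < n:
--             vals.add(0)
--         total += len(vals)
--     return total
-- ===== Notes on version B (the rewrite author's own statement) =====
-- stated objective: faster
-- what changed: Instead of building an n x n matrix, joining its rows and columns into strings and counting the distinct strings for every ones-count (O(n^2) work per value), B derives the number of distinct row/column patterns of the column-major filling in O(1) per ones-count by a case analysis on q = k//n and r = k%n, summing over k.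
import Mathlib
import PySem

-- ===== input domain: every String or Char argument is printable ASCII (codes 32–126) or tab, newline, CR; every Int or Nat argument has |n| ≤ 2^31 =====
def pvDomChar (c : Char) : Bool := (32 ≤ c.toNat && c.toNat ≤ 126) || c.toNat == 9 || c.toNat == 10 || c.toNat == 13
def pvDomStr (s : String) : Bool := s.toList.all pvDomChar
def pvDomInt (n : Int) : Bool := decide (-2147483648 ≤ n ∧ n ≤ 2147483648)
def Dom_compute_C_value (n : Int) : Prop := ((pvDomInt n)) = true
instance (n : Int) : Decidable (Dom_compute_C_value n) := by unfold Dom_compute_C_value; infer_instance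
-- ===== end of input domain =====

-- B replaces A's per-ones-count matrix/string construction by an O(1) case analysis on
-- q = k // n and r = k % n, summed over all k; equivalence is proved on Pre_ (0 ≤ n).

-- ===== PORT A =====
-- hand port of zip(*matrix): stops as soon as any list is exhausted (exact for lists of ints)
def zipAux : List Int → List (List Int) → List (List Int)
  | [], _ => []
  | x :: xs, rest =>
    if rest.all (fun l => !l.isEmpty) then
      (x :: rest.map (fun l => l.headD 0)) :: zipAux xs (rest.map (fun l => l.tail))
    else []

def zipStar (ms : List (List Int)) : List (List Int) :=
  match ms with
  | [] => []
  | m :: rest => zipAux m rest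

-- ''.join(map(str, row))
def pyJoinRow (row : List Int) : String := PySem.Str.join "" (row.map PySem.Int.toStr)

def compute_C_value (n : Int) : Int :=
  (PySem.List.pyRange 0 (n ^ 2 + 1) 1).foldl (fun C ones =>
    let matrix0 : List (List Int) :=
      (PySem.List.pyRange 0 n 1).map (fun _ => (PySem.List.pyRange 0 n 1).map (fun _ => (0 : Int)))
    -- matrix[i % n][i // n] = 1  (in-range under Pre_; pyGetD/pySetD are the total forms)
    let matrix := (PySem.List.pyRange 0 ones 1).foldl (fun m i =>
      PySem.List.pySetD m (PySem.Int.mod i n)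
        (PySem.List.pySetD (PySem.List.pyGetD m (PySem.Int.mod i n) []) (PySem.Int.floordiv i n) 1)) matrix0
    let rows := matrix.map pyJoinRow
    let columns := (zipStar matrix).map pyJoinRow
    C + ((PySem.Set.ofList (rows ++ columns)).length : Int)) 0

-- ===== PORT B =====
def compute_C_value_alt (n : Int) : Int :=
  if n == 0 then 0
  else
    (PySem.List.pyRange 0 (n * n + 1) 1).foldl (fun total k =>
      let q := PySem.Int.floordiv k n
      let r := PySem.Int.mod k n
      let vals : PySem.Set Int := PySem.Set.ofList [q]
      let vals := if r ≠ 0 then PySem.Set.add vals (q + 1) else vals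
      let vals := if 1 ≤ q then PySem.Set.add vals n else vals
      let vals := if r ≠ 0 then PySem.Set.add vals r else vals
      let vals := if q + (if r ≠ 0 then 1 else 0) < n then PySem.Set.add vals 0 else vals
      total + (vals.length : Int)) 0

-- ===== PRECONDITION & SPEC =====
-- A raises IndexError for every n < 0 (the matrix is empty but ones reaches 1); Pre_ excludes exactly those.
def Pre_compute_C_value (n : Int) : Prop := 0 ≤ n
instance (n : Int) : Decidable (Pre_compute_C_value n) := by unfold Pre_compute_C_value; infer_instance
def pvWitness_compute_C_value : Int := 3

def Spec_compute_C_value (n : Int) (out : Int) : Prop := out = compute_C_value_alt n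
instance (n : Int) (out : Int) : Decidable (Spec_compute_C_value n out) := by unfold Spec_compute_C_value; infer_instance

-- ===== CLAIM (what is proved, stated in full; the proofs are below) =====
def Claim_equal_compute_C_value : Prop :=
  ∀ (n : Int), Dom_compute_C_value n → Pre_compute_C_value n → Spec_compute_C_value n (compute_C_value n)

-- ===== LEMMAS AND PROOFS =====

def cellRow (n k r : Int) : List Int :=
  (PySem.List.pyRange 0 n 1).map (fun c => if c * n + r < k then (1 : Int) else 0)

def cellMat (n k : Int) : List (List Int) :=
  (PySem.List.pyRange 0 n 1).map (fun r => cellRow n k r)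

def bitsChars (n a : Int) : List Char :=
  (PySem.List.pyRange 0 n 1).map (fun c => if c < a then '1' else '0')

def bitsStr (n a : Int) : String := String.ofList (bitsChars n a)

theorem joinRow_eq (l : List Int) (p : Int → Prop) [DecidablePred p] :
    pyJoinRow (l.map (fun c => if p c then (1 : Int) else 0)) =
      String.ofList (l.map (fun c => if p c then '1' else '0')) := by
  refine String.toList_inj.mp ?_
  simp only [pyJoinRow, PySem.Str.toList_join, List.map_map]
  have h1 : ∀ c ∈ l, (String.toList ∘ PySem.Int.toStr ∘ fun c => if p c then (1 : Int) else 0) c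
      = (fun c => [if p c then '1' else '0']) c := by
    intro c _
    by_cases h : p c <;> simp [h, PySem.Int.toList_toStr] <;> decide
  rw [List.map_congr_left h1]
  have h2 : (l.map fun c => [if p c then '1' else '0'])
      = (l.map fun c => if p c then '1' else '0').map (fun c => [c]) := by
    simp [List.map_map]
  rw [h2, show "".toList = ([] : List Char) from rfl, PySem.Chars.join_nil_singletons]
  simp

theorem divmod_unique (n i r c : Int) (hn : 0 < n) (hi : 0 ≤ i)
    (hr : 0 ≤ r) (hr' : r < n) (hc : 0 ≤ c) :
    c * n + r = i ↔ (r = PySem.Int.mod i n ∧ c = PySem.Int.floordiv i n) := by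
  rw [PySem.Int.mod_eq_emod_of_pos hn, PySem.Int.floordiv_eq_ediv_of_pos hn]
  constructor
  · intro h
    have := (Int.ediv_emod_unique (a := i) (b := n) (r := r) (q := c) hn).mpr
      ⟨by linarith [h], hr, hr'⟩
    exact ⟨this.2.symm, this.1.symm⟩
  · rintro ⟨rfl, rfl⟩
    have := Int.ediv_add_emod i n
    linarith

theorem stripe_row (n k q rem r c : Int) (hn : 0 < n) (hq : n * q + rem = k)
    (hrem : 0 ≤ rem) (hrem' : rem < n) (hr : 0 ≤ r) (hr' : r < n) :
    (c * n + r < k) ↔ (c < if r < rem then q + 1 else q) := by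
  split <;> constructor <;> intro h2 <;> nlinarith

theorem stripe_col (n k q rem r c : Int) (hn : 0 < n) (hq : n * q + rem = k)
    (hrem : 0 ≤ rem) (hrem' : rem < n) (hr : 0 ≤ r) (hr' : r < n) (hc : 0 ≤ c) :
    (c * n + r < k) ↔ (r < if c < q then n else if c = q then rem else 0) := by
  split
  · constructor <;> intro h2 <;> nlinarith
  · split
    · constructor <;> intro h2 <;> nlinarith
    · rename_i h3 h4
      have : q < c := by omega
      constructor <;> intro h2 <;> nlinarith

theorem bitsStr_inj (n a b : Int) (ha : 0 ≤ a) (ha' : a ≤ n) (hb : 0 ≤ b) (hb' : b ≤ n)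
    (h : bitsStr n a = bitsStr n b) : a = b := by
  by_contra hne
  -- wlog a < b
  have key : ∀ x y : Int, 0 ≤ x → x < y → y ≤ n → bitsChars n x ≠ bitsChars n y := by
    intro x y hx hxy hyn heq
    have hxn : x.toNat < (PySem.List.pyRange 0 n 1).length := by
      rw [PySem.List.length_pyRange_one]; omega
    have h1 := congrArg (fun l => l[x.toNat]?) heq
    simp only [bitsChars, List.getElem?_map, List.getElem?_eq_getElem hxn,
      PySem.List.getElem_pyRange_one] at h1
    have hx' : (0 : Int) + x.toNat = x := by omega
    rw [hx'] at h1
    have : ¬ x < x := lt_irrefl x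
    simp [this, show x < y from hxy] at h1
  have heq : bitsChars n a = bitsChars n b := by
    have := congrArg String.toList h
    simpa [bitsStr] using this
  rcases lt_or_gt_of_ne hne with hlt | hgt
  · exact key a b ha hlt hb' heq
  · exact key b a hb hgt ha' heq.symm

theorem set_len_map (L S : List Int) (f : Int → String) (hS : S.Nodup)
    (hmem : ∀ a, a ∈ L ↔ a ∈ S)
    (hinj : ∀ a ∈ S, ∀ b ∈ S, f a = f b → a = b) :
    (PySem.Set.ofList (L.map f)).length = S.length := by
  have h1 : (PySem.Set.ofList (L.map f)).Perm (S.map f) := by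
    rw [List.perm_ext_iff_of_nodup (PySem.Set.nodup_ofList _) (List.Nodup.map_on hinj hS)]
    intro x
    rw [PySem.Set.mem_ofList]
    simp only [List.mem_map]
    constructor
    · rintro ⟨a, haL, rfl⟩; exact ⟨a, (hmem a).mp haL, rfl⟩
    · rintro ⟨a, haS, rfl⟩; exact ⟨a, (hmem a).mpr haS, rfl⟩
  rw [h1.length_eq, List.length_map]

theorem zipAux_eq (m : List Int) (rest : List (List Int))
    (h : ∀ l ∈ rest, l.length = m.length) :
    zipAux m rest =
      (List.range m.length).map (fun c => m.getD c 0 :: rest.map (fun l => l.getD c 0)) := by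
  induction m generalizing rest with
  | nil => simp [zipAux]
  | cons x xs ih =>
    have hne : rest.all (fun l => !l.isEmpty) = true := by
      rw [List.all_eq_true]
      intro l hl
      have := h l hl
      simp only [List.length_cons] at this
      cases l with
      | nil => simp at this
      | cons a as => simp
    rw [zipAux, if_pos hne]
    have htails : ∀ l ∈ rest.map (fun l => l.tail), l.length = xs.length := by
      intro l hl
      rcases List.mem_map.mp hl with ⟨l', hl', rfl⟩
      have := h l' hl'
      simp only [List.length_cons] at this
      simp [List.length_tail, this]
    rw [ih _ htails]
    simp only [List.length_cons, List.range_succ_eq_map, List.map_cons, List.map_map]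
    congr 1
    · -- heads
      congr 1
      apply List.map_congr_left
      intro l _
      cases l <;> simp
    · -- tail columns
      apply List.map_congr_left
      intro c _
      simp only [Function.comp_apply, List.getD_cons_succ]
      congr 1
      apply List.map_congr_left
      intro l hl
      have hl2 := h l hl
      simp only [List.length_cons] at hl2
      cases l <;> simp

theorem zipStar_rect (M : List (List Int)) (p : Nat) (hM : M ≠ [])
    (h : ∀ l ∈ M, l.length = p) :
    zipStar M = (List.range p).map (fun c => M.map (fun l => l.getD c 0)) := by
  cases M with
  | nil => exact absurd rfl hM
  | cons m rest =>
    show zipAux m rest = _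
    rw [zipAux_eq m rest (fun l hl => by
      rw [h l (List.mem_cons_of_mem _ hl), h m List.mem_cons_self])]
    rw [h m List.mem_cons_self]
    apply List.map_congr_left
    intro c _
    simp

theorem getD_map_pyRange_zero' {α : Type} (f : Int → α) (n : Int) (c : Nat) (d : α)
    (hc : (c : Int) < n) :
    ((PySem.List.pyRange 0 n 1).map f).getD c d = f c := by
  rw [List.getD_eq_getElem?_getD]
  have hlen : c < ((PySem.List.pyRange 0 n 1).map f).length := by
    simp [PySem.List.length_pyRange_one]; omega
  rw [List.getElem?_eq_getElem hlen]
  simp [PySem.List.getElem_pyRange_one]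

theorem fill_step (n i : Int) (hn : 0 < n) (hi : 0 ≤ i) (hi' : i < n ^ 2) :
    PySem.List.pySetD (cellMat n i) (PySem.Int.mod i n)
      (PySem.List.pySetD (PySem.List.pyGetD (cellMat n i) (PySem.Int.mod i n) [])
        (PySem.Int.floordiv i n) 1)
    = cellMat n (i + 1) := by
  have hr0 : 0 ≤ PySem.Int.mod i n := by
    rw [PySem.Int.mod_eq_emod_of_pos hn]; exact Int.emod_nonneg i hn.ne'
  have hr1 : PySem.Int.mod i n < n := by
    rw [PySem.Int.mod_eq_emod_of_pos hn]; exact Int.emod_lt_of_pos i hn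
  have hc0 : 0 ≤ PySem.Int.floordiv i n := by
    rw [PySem.Int.floordiv_eq_ediv_of_pos hn]; exact Int.ediv_nonneg hi hn.le
  have hdm : PySem.Int.floordiv i n * n + PySem.Int.mod i n = i := by
    rw [PySem.Int.mod_eq_emod_of_pos hn, PySem.Int.floordiv_eq_ediv_of_pos hn]
    have := Int.ediv_add_emod i n
    linarith
  have hc1 : PySem.Int.floordiv i n < n := by
    by_contra hcon
    push_neg at hcon
    have : n * n ≤ PySem.Int.floordiv i n * n := by nlinarith
    nlinarith [sq_nonneg n]
  set r0 := PySem.Int.mod i n with hr0def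
  set c0 := PySem.Int.floordiv i n with hc0def
  -- the accessed row
  have hget : PySem.List.pyGetD (cellMat n i) r0 [] = cellRow n i r0 := by
    rw [cellMat, PySem.List.pyGetD_map_pyRange_of_nonneg _ _ _ _ hr0 hr1]
  rw [hget, PySem.List.pySetD_of_nonneg _ _ hc0, PySem.List.pySetD_of_nonneg _ _ hr0]
  have hlenmat : ∀ m, (cellMat n m).length = n.toNat := by
    intro m; simp [cellMat, PySem.List.length_pyRange_one]
  have hlenrow : ∀ m r, (cellRow n m r).length = n.toNat := by
    intro m r; simp [cellRow, PySem.List.length_pyRange_one]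
  apply List.ext_getElem
  · simp [hlenmat, hlenrow]
  intro t ht1 ht2
  rw [List.getElem_set]
  have htN : t < n.toNat := by simpa [hlenmat] using ht2
  have hmat_el : ∀ m, (cellMat n m)[t]'(by rw [hlenmat]; exact htN) = cellRow n m (0 + (t : Int)) := by
    intro m
    simp [cellMat, List.getElem_map, PySem.List.getElem_pyRange_one]
  rw [hmat_el i, hmat_el (i+1)]
  have htcast : (0 : Int) + (t : Int) = (t : Int) := by ring
  rw [htcast]
  split_ifs with hteq
  · have htr0 : (t : Int) = r0 := by omega
    apply List.ext_getElem
    · simp [hlenrow]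
    intro u hu1 hu2
    have huN : u < n.toNat := by simpa [hlenrow] using hu2
    have hrow_el : ∀ m r, (cellRow n m r)[u]'(by rw [hlenrow]; exact huN)
        = if ((u : Int)) * n + r < m then (1 : Int) else 0 := by
      intro m r
      simp [cellRow, List.getElem_map, PySem.List.getElem_pyRange_one]
    rw [List.getElem_set, hrow_el, hrow_el]
    have hdu := divmod_unique n i r0 ((u : Int)) hn hi hr0 hr1 (by positivity)
    have hiff : ((u:Int) * n + r0 = i) ↔ ((u:Int) = c0) := by
      rw [hdu]
      constructor
      · rintro ⟨-, h⟩; exact h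
      · intro h; exact ⟨hr0def, h⟩
    rw [htr0]
    generalize hX : (u:Int) * n = X at hiff ⊢
    split_ifs with h1 h2 h2 <;> first | rfl | (exfalso; omega)
  · have htr0 : (t : Int) ≠ r0 := by
      intro hcon
      exact hteq (by omega)
    rw [cellRow, cellRow]
    apply List.map_congr_left
    intro c hcmem
    have hc := PySem.List.mem_pyRange_one.mp hcmem
    have hdu := divmod_unique n i ((t:Int)) c hn hi (by positivity) (by omega) hc.1
    have hne : c * n + (t:Int) ≠ i := fun hcon => htr0 (hdu.mp hcon).1
    have hiff2 : (c * n + (t:Int) < i + 1) ↔ (c * n + (t:Int) < i) := by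
      generalize c * n + (t:Int) = Y at hne ⊢
      omega
    simp only [hiff2]

theorem matrix0_eq (n : Int) (hn : 0 < n) :
    ((PySem.List.pyRange 0 n 1).map (fun _ => (PySem.List.pyRange 0 n 1).map (fun _ => (0 : Int))))
      = cellMat n 0 := by
  rw [cellMat]
  apply List.map_congr_left
  intro r hr
  have hrb := PySem.List.mem_pyRange_one.mp hr
  rw [cellRow]
  apply List.map_congr_left
  intro c hc
  have hcb := PySem.List.mem_pyRange_one.mp hc
  have : ¬ (c * n + r < 0) := by nlinarith
  rw [if_neg this]

theorem fill_loop (n : Int) (hn : 0 < n) (j : Nat) (hj : (j : Int) ≤ n ^ 2) :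
    (PySem.List.pyRange 0 (j : Int) 1).foldl (fun m i =>
      PySem.List.pySetD m (PySem.Int.mod i n)
        (PySem.List.pySetD (PySem.List.pyGetD m (PySem.Int.mod i n) []) (PySem.Int.floordiv i n) 1))
      ((PySem.List.pyRange 0 n 1).map (fun _ => (PySem.List.pyRange 0 n 1).map (fun _ => (0 : Int))))
    = cellMat n (j : Int) := by
  induction j with
  | zero =>
    rw [show ((0 : Nat) : Int) = 0 from rfl, PySem.List.pyRange_one_eq_nil le_rfl]
    simpa using matrix0_eq n hn
  | succ j ih =>
    have hj' : (j : Int) ≤ n ^ 2 := by push_cast at hj ⊢; omega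
    have hcast : ((j + 1 : Nat) : Int) = (j : Int) + 1 := by push_cast; ring
    rw [hcast, PySem.List.pyRange_one_succ_right (by positivity), List.foldl_append, ih hj']
    simp only [List.foldl_cons, List.foldl_nil]
    exact fill_step n (j : Int) hn (by positivity) (by push_cast at hj; omega)

theorem mem_ite_add (P : Prop) [Decidable P] (s : PySem.Set Int) (x a : Int) :
    a ∈ (if P then PySem.Set.add s x else s) ↔ (a ∈ s ∨ (P ∧ a = x)) := by
  split_ifs with h
  · rw [PySem.Set.mem_add]
    tauto
  · tauto

def chainS (n q rem : Int) : PySem.Set Int :=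
  let vals : PySem.Set Int := PySem.Set.ofList [q]
  let vals := if rem ≠ 0 then PySem.Set.add vals (q + 1) else vals
  let vals := if 1 ≤ q then PySem.Set.add vals n else vals
  let vals := if rem ≠ 0 then PySem.Set.add vals rem else vals
  if q + (if rem ≠ 0 then 1 else 0) < n then PySem.Set.add vals 0 else vals

def valsOf (n k : Int) : PySem.Set Int :=
  let q := PySem.Int.floordiv k n
  let r := PySem.Int.mod k n
  let vals : PySem.Set Int := PySem.Set.ofList [q]
  let vals := if r ≠ 0 then PySem.Set.add vals (q + 1) else vals
  let vals := if 1 ≤ q then PySem.Set.add vals n else vals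
  let vals := if r ≠ 0 then PySem.Set.add vals r else vals
  let vals := if q + (if r ≠ 0 then 1 else 0) < n then PySem.Set.add vals 0 else vals
  vals

theorem inner_core (n k q rem : Int) (hn : 0 < n) (hk : 0 ≤ k) (hk' : k ≤ n ^ 2)
    (hdm : n * q + rem = k) (hrem0 : 0 ≤ rem) (hrem1 : rem < n) (hq0 : 0 ≤ q) :
    ((PySem.Set.ofList ((cellMat n k).map pyJoinRow ++ (zipStar (cellMat n k)).map pyJoinRow)).length : Int)
    = ((chainS n q rem).length : Int) := by
  have hqn : q ≤ n := by nlinarith [sq_nonneg n]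
  have himp : 0 < rem → q < n := by
    intro h
    by_contra hcon
    have hqe : q = n := le_antisymm hqn (by omega)
    have h2 : n * q = n * n := by rw [hqe]
    nlinarith [sq_nonneg n]
  -- rows as bit strings
  have hrows : (cellMat n k).map pyJoinRow
      = ((PySem.List.pyRange 0 n 1).map (fun r => if r < rem then q + 1 else q)).map (bitsStr n) := by
    rw [cellMat, List.map_map, List.map_map]
    apply List.map_congr_left
    intro r hr
    have hrb := PySem.List.mem_pyRange_one.mp hr
    simp only [Function.comp_apply]
    rw [cellRow, joinRow_eq _ (fun c => c * n + r < k), bitsStr, bitsChars]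
    congr 1
    apply List.map_congr_left
    intro c hc
    have hiff := stripe_row n k q rem r c hn hdm hrem0 hrem1 hrb.1 hrb.2
    by_cases h : c * n + r < k
    · rw [if_pos h, if_pos (hiff.mp h)]
    · rw [if_neg h, if_neg (fun hcc => h (hiff.mpr hcc))]
  -- columns as bit strings
  have hcols : (zipStar (cellMat n k)).map pyJoinRow
      = ((List.range n.toNat).map (fun (c : Nat) => if (c:Int) < q then n else if (c:Int) = q then rem else 0)).map (bitsStr n) := by
    rw [zipStar_rect (cellMat n k) n.toNat
        (by simp only [cellMat]
            intro hcon
            have := congrArg List.length hcon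
            simp [PySem.List.length_pyRange_one] at this
            omega)
        (by intro l hl
            rcases List.mem_map.mp hl with ⟨r, _, rfl⟩
            simp [cellRow, PySem.List.length_pyRange_one])]
    rw [List.map_map, List.map_map]
    apply List.map_congr_left
    intro c hc
    have hcN : (c:Int) < n := by
      have := List.mem_range.mp hc; omega
    simp only [Function.comp_apply]
    have hcol : (cellMat n k).map (fun l => l.getD c 0)
        = (PySem.List.pyRange 0 n 1).map (fun r => if (c:Int) * n + r < k then (1:Int) else 0) := by
      rw [cellMat, List.map_map]
      apply List.map_congr_left
      intro r hr
      simp only [Function.comp_apply]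
      rw [cellRow, getD_map_pyRange_zero' _ _ _ _ hcN]
    rw [hcol, joinRow_eq _ (fun r => (c:Int) * n + r < k), bitsStr, bitsChars]
    congr 1
    apply List.map_congr_left
    intro r hr
    have hrb := PySem.List.mem_pyRange_one.mp hr
    have hiff := stripe_col n k q rem r (c:Int) hn hdm hrem0 hrem1 hrb.1 hrb.2 (by positivity)
    by_cases h : (c:Int) * n + r < k
    · rw [if_pos h, if_pos (hiff.mp h)]
    · rw [if_neg h, if_neg (fun hcc => h (hiff.mpr hcc))]
  rw [hrows, hcols, ← List.map_append]
  have hSmem : ∀ a, a ∈ chainS n q rem ↔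
      (a = q ∨ (rem ≠ 0 ∧ a = q + 1) ∨ (1 ≤ q ∧ a = n) ∨ (rem ≠ 0 ∧ a = rem)
        ∨ (q + (if rem ≠ 0 then 1 else 0) < n ∧ a = 0)) := by
    intro a
    simp only [chainS, mem_ite_add, PySem.Set.mem_ofList, List.mem_singleton]
    tauto
  have hSnodup : (chainS n q rem).Nodup := by
    rw [chainS]
    split_ifs <;>
      (repeat'
        first
        | apply PySem.Set.nodup_add
        | exact PySem.Set.nodup_ofList _)
  congr 1
  apply set_len_map _ _ _ hSnodup
  · -- membership
    intro a
    rw [hSmem a]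
    simp only [List.mem_append, List.mem_map, PySem.List.mem_pyRange_one, List.mem_range]
    constructor
    · rintro (⟨r, ⟨hr0, hr1⟩, rfl⟩ | ⟨c, hc, rfl⟩)
      · by_cases h : r < rem
        · rw [if_pos h]
          right; left
          exact ⟨by omega, rfl⟩
        · rw [if_neg h]
          left; rfl
      · have hcN : (c:Int) < n := by omega
        by_cases h1 : (c:Int) < q
        · rw [if_pos h1]
          right; right; left
          exact ⟨by omega, rfl⟩
        · rw [if_neg h1]
          by_cases h2 : (c:Int) = q
          · rw [if_pos h2]
            by_cases hr : rem = 0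
            · right; right; right; right
              refine ⟨?_, hr⟩
              rw [if_neg (by omega)]
              omega
            · right; right; right; left
              exact ⟨hr, rfl⟩
          · rw [if_neg h2]
            right; right; right; right
            refine ⟨?_, rfl⟩
            by_cases hrz : rem ≠ 0
            · rw [if_pos hrz]
              have := himp (by omega)
              omega
            · rw [if_neg hrz]
              omega
    · rintro (rfl | ⟨hne, rfl⟩ | ⟨hq1, rfl⟩ | ⟨hne, rfl⟩ | ⟨hlt, rfl⟩)
      · left
        exact ⟨rem, ⟨by omega, by omega⟩, by rw [if_neg (lt_irrefl rem)]⟩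
      · left
        exact ⟨0, ⟨le_rfl, by omega⟩, by rw [if_pos (by omega)]⟩
      · right
        refine ⟨0, by omega, ?_⟩
        rw [show ((0:Nat):Int) = 0 from rfl, if_pos (by omega)]
      · right
        have hqlt := himp (by omega)
        refine ⟨q.toNat, by omega, ?_⟩
        rw [show ((q.toNat:Nat):Int) = q by omega]
        rw [if_neg (lt_irrefl q), if_pos rfl]
      · by_cases hr : rem = 0
        · right
          have hlt' : q < n := by
            rw [if_neg (by omega)] at hlt
            omega
          refine ⟨q.toNat, by omega, ?_⟩
          rw [show ((q.toNat:Nat):Int) = q by omega]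
          rw [if_neg (lt_irrefl q), if_pos rfl]
          omega
        · right
          have hlt' : q + 1 < n := by
            rw [if_pos hr] at hlt
            omega
          refine ⟨(q+1).toNat, by omega, ?_⟩
          rw [show (((q+1).toNat:Nat):Int) = q + 1 by omega]
          rw [if_neg (by omega), if_neg (by omega)]
  · -- injectivity of bitsStr n on the members of chainS
    intro a ha b hb hfab
    have hbound : ∀ x ∈ chainS n q rem, 0 ≤ x ∧ x ≤ n := by
      intro x hx
      rcases (hSmem x).mp hx with rfl | ⟨h1, rfl⟩ | ⟨h1, rfl⟩ | ⟨h1, rfl⟩ | ⟨h1, rfl⟩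
      · omega
      · have := himp (by omega); omega
      · omega
      · omega
      · omega
    obtain ⟨ha1, ha2⟩ := hbound a ha
    obtain ⟨hb1, hb2⟩ := hbound b hb
    exact bitsStr_inj n a b ha1 ha2 hb1 hb2 hfab

theorem inner_eq (n : Int) (hn : 0 < n) (k : Int) (hk : 0 ≤ k) (hk' : k ≤ n ^ 2) :
    ((PySem.Set.ofList ((cellMat n k).map pyJoinRow ++ (zipStar (cellMat n k)).map pyJoinRow)).length : Int)
    = ((valsOf n k).length : Int) := by
  have hrem0 : 0 ≤ PySem.Int.mod k n := by
    rw [PySem.Int.mod_eq_emod_of_pos hn]; exact Int.emod_nonneg k hn.ne'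
  have hrem1 : PySem.Int.mod k n < n := by
    rw [PySem.Int.mod_eq_emod_of_pos hn]; exact Int.emod_lt_of_pos k hn
  have hq0 : 0 ≤ PySem.Int.floordiv k n := by
    rw [PySem.Int.floordiv_eq_ediv_of_pos hn]; exact Int.ediv_nonneg hk hn.le
  have hdm : n * PySem.Int.floordiv k n + PySem.Int.mod k n = k := by
    rw [PySem.Int.mod_eq_emod_of_pos hn, PySem.Int.floordiv_eq_ediv_of_pos hn]
    exact Int.ediv_add_emod k n
  have hv : valsOf n k = chainS n (PySem.Int.floordiv k n) (PySem.Int.mod k n) := rfl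
  rw [hv]
  exact inner_core n k _ _ hn hk hk' hdm hrem0 hrem1 hq0

set_option maxHeartbeats 1000000 in
theorem compute_C_value_spec' :
    ∀ (n : Int), 0 ≤ n → compute_C_value n = compute_C_value_alt n := by
  intro n hn
  by_cases h0 : n = 0
  · subst h0
    decide
  · have hpos : 0 < n := lt_of_le_of_ne hn (Ne.symm h0)
    rw [compute_C_value, compute_C_value_alt, if_neg (by simpa using h0)]
    rw [show n ^ 2 + 1 = n * n + 1 by ring]
    apply PySem.List.foldl_congr_mem
    intro acc k hkmem
    have hkb := PySem.List.mem_pyRange_one.mp hkmem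
    have hk0 : 0 ≤ k := hkb.1
    have hk1 : k ≤ n ^ 2 := by
      have h2 := hkb.2
      have hnn : n ^ 2 = n * n := sq n
      linarith
    simp only []
    rw [show PySem.List.pyRange 0 k 1 = PySem.List.pyRange 0 ((k.toNat : Nat) : Int) 1 from by
      rw [Int.toNat_of_nonneg hk0]]
    rw [fill_loop n hpos k.toNat (by rw [Int.toNat_of_nonneg hk0]; exact hk1)]
    rw [Int.toNat_of_nonneg hk0]
    exact congrArg (fun z => acc + z) (inner_eq n hpos k hk0 hk1)

-- ===== VERDICT (by name: the statement is the Claim_ definition above) =====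
theorem compute_C_value_spec : Claim_equal_compute_C_value := by
  intro n _ hp
  exact compute_C_value_spec' n hp
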